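-- pv_equiv track=rewrite | github.com/zjutoe/pdfdataextract | jianghuaiqiche.py | extract_tables_from_text
-- ===== SOURCE A (Python) =====
-- def extract_tables_from_text(text_page):
--     # 这里假设表格是以某种格式分隔的文本
--     # 你可以根据实际情况调整这个函数
--     lines = text_page.split('\n')
--     tables = []
--     table = []
--     for line in lines:
--         if line.strip():
--             row = line.split()
--             if table and len(row) != len(table[0]):
--                 continue  # 跳过列数不匹配的行
--             table.append(row)
--         else:
--             if table:
--                 tables.append(table)
--                 table = []
--     if table:
--         tables.append(table)
--     return tables
-- ===== SOURCE B (Python) =====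
-- def extract_tables_from_text(text_page):
--     lines = text_page.split('\n')
--     # stage 1: group the lines into maximal blocks of consecutive non-blank lines
--     blocks = []
--     i, n = 0, len(lines)
--     while i < n:
--         if not lines[i].strip():
--             i += 1
--             continue
--         j = i + 1
--         while j < n and lines[j].strip():
--             j += 1
--         blocks.append(lines[i:j])
--         i = j
--     # stage 2: build one table per block: first row unconditionally,
--     # later rows only when their column count matches the first row's
--     tables = []
--     for block in blocks:
--         rows = [line.split() for line in block]
--         first = rows[0]
--         tables.append([first] + [r for r in rows[1:] if len(r) == len(first)])
--     return tables
-- ===== Notes on version B (the rewrite author's own statement) =====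
-- stated objective: alternative
-- what changed: Replaces A's single running-accumulator loop (open table flushed on blank lines) by a two-stage pass: first group the lines into maximal blocks of non-blank lines with a two-pointer scan, then build each table per block as the first row plus the later rows whose column count matches it.
import Mathlib
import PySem

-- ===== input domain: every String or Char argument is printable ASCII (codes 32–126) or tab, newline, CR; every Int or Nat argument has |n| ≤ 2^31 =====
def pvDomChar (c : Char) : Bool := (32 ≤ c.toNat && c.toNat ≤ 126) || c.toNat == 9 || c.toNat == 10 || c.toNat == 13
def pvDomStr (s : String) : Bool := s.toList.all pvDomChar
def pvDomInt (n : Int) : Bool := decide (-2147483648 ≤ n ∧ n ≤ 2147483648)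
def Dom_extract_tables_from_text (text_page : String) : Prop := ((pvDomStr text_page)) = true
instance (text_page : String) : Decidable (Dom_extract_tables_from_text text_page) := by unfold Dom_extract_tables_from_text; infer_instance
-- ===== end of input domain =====

-- B restructures A's one accumulator loop into group-into-blocks then build-table-per-block ('alternative', same cost).

-- ===== PORT A =====
-- 'if line.strip():' — non-blank test shared by both ports
def pvNonblank (l : String) : Bool := !(PySem.Str.strip l == "")

-- one iteration of A's for-loop over (tables, table)
def pvStepA (st : List (List (List String)) × List (List String)) (line : String) :
    List (List (List String)) × List (List String) :=
  if pvNonblank line then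
    let row := PySem.Str.split₀ line
    if !st.2.isEmpty && row.length != (st.2.headD []).length then st  -- continue: skip mismatched row
    else (st.1, st.2 ++ [row])
  else
    if st.2.isEmpty then st else (st.1 ++ [st.2], [])

-- final 'if table: tables.append(table)'
def pvFinA (st : List (List (List String)) × List (List String)) : List (List (List String)) :=
  if st.2.isEmpty then st.1 else st.1 ++ [st.2]

def extract_tables_from_text (text_page : String) : List (List (List String)) :=
  pvFinA (((PySem.Str.split? text_page "\n").getD []).foldl pvStepA ([], []))

-- ===== PORT B =====
-- stage 1: maximal blocks of consecutive non-blank lines (B's two-pointer scan)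
def pvBlocks : List String → List (List String)
  | [] => []
  | l :: ls =>
    if pvNonblank l then
      (l :: ls.takeWhile pvNonblank) :: pvBlocks (ls.dropWhile pvNonblank)
    else pvBlocks ls
termination_by lines => lines.length
decreasing_by
  · exact Nat.lt_succ_of_le (List.length_dropWhile_le _ _)
  · exact Nat.lt_succ_self _

-- stage 2: first row plus later rows with matching column count
def pvTable (block : List String) : List (List String) :=
  match block.map PySem.Str.split₀ with
  | [] => []
  | first :: rest => first :: rest.filter (fun r => r.length == first.length)

def extract_tables_from_text_alt (text_page : String) : List (List (List String)) :=
  (pvBlocks ((PySem.Str.split? text_page "\n").getD [])).map pvTable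

-- ===== PRECONDITION & SPEC =====
def Spec_extract_tables_from_text (text_page : String) (out : List (List (List String))) : Prop := out = extract_tables_from_text_alt text_page
instance (text_page : String) (out : List (List (List String))) : Decidable (Spec_extract_tables_from_text text_page out) := by unfold Spec_extract_tables_from_text; infer_instance

-- ===== CLAIM (what is proved, stated in full; the proofs are below) =====
def Claim_equal_extract_tables_from_text : Prop := ∀ (text_page : String), Dom_extract_tables_from_text text_page → Spec_extract_tables_from_text text_page (extract_tables_from_text text_page)

-- ===== LEMMAS AND PROOFS =====

-- the four shapes pvStepA takes on a cons state
theorem pvStepA_nb_nil {l : String} (h : pvNonblank l = true) (ts : List (List (List String))) :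
    pvStepA (ts, []) l = (ts, [PySem.Str.split₀ l]) := by
  simp [pvStepA, h]

theorem pvStepA_nb_keep {l : String} (h : pvNonblank l = true) (ts : List (List (List String)))
    (first : List String) (kept : List (List String))
    (hm : (PySem.Str.split₀ l).length = first.length) :
    pvStepA (ts, first :: kept) l = (ts, first :: (kept ++ [PySem.Str.split₀ l])) := by
  simp [pvStepA, h, hm]

theorem pvStepA_nb_skip {l : String} (h : pvNonblank l = true) (ts : List (List (List String)))
    (first : List String) (kept : List (List String))
    (hm : ¬ (PySem.Str.split₀ l).length = first.length) :
    pvStepA (ts, first :: kept) l = (ts, first :: kept) := by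
  simp [pvStepA, h, bne, hm]

theorem pvStepA_blank_nil {l : String} (h : pvNonblank l = false) (ts : List (List (List String))) :
    pvStepA (ts, []) l = (ts, []) := by
  simp [pvStepA, h]

theorem pvStepA_blank_flush {l : String} (h : pvNonblank l = false)
    (ts : List (List (List String))) (first : List String) (kept : List (List String)) :
    pvStepA (ts, first :: kept) l = (ts ++ [first :: kept], []) := by
  simp [pvStepA, h]

-- main invariant: A's fold from an empty open table produces the blocks' tables;
-- from an open table (first :: kept) it first finishes the current block, then continues.
theorem pvMain (lines : List String) :
    (∀ ts, pvFinA (lines.foldl pvStepA (ts, [])) = ts ++ (pvBlocks lines).map pvTable)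
    ∧ (∀ ts first kept,
        pvFinA (lines.foldl pvStepA (ts, first :: kept)) =
          (ts ++ [(first :: kept) ++
            ((lines.takeWhile pvNonblank).map PySem.Str.split₀).filter
              (fun r => r.length == first.length)]) ++
          (pvBlocks (lines.dropWhile pvNonblank)).map pvTable) := by
  induction lines with
  | nil => constructor <;> simp [pvFinA, pvBlocks]
  | cons l ls ih =>
    constructor
    · intro ts
      cases h : pvNonblank l with
      | true =>
        rw [List.foldl_cons, pvStepA_nb_nil h, (ih.2 ts (PySem.Str.split₀ l) [])]
        simp [pvBlocks, h, pvTable]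
      | false =>
        rw [List.foldl_cons, pvStepA_blank_nil h, ih.1 ts]
        simp [pvBlocks, h]
    · intro ts first kept
      cases h : pvNonblank l with
      | true =>
        by_cases hm : (PySem.Str.split₀ l).length = first.length
        · rw [List.foldl_cons, pvStepA_nb_keep h ts first kept hm,
            ih.2 ts first (kept ++ [PySem.Str.split₀ l])]
          simp [h, hm]
        · rw [List.foldl_cons, pvStepA_nb_skip h ts first kept hm, ih.2 ts first kept]
          simp [h, hm]
      | false =>
        rw [List.foldl_cons, pvStepA_blank_flush h ts first kept, ih.1 (ts ++ [first :: kept])]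
        simp [h, pvBlocks]

-- ===== VERDICT (by name: the statement is the Claim_ definition above) =====
theorem extract_tables_from_text_spec : Claim_equal_extract_tables_from_text := by
  intro text_page _
  unfold Spec_extract_tables_from_text extract_tables_from_text extract_tables_from_text_alt
  exact (pvMain ((PySem.Str.split? text_page "\n").getD [])).1 []
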